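-- pv_equiv track=rewrite | github.com/jaresty/talon-ai-tools | lib/talonSettings.py | _canonicalise_axis_tokens
-- ===== SOURCE A (Python) =====
-- _AXIS_SOFT_CAPS: dict[str, int] = {
--     # Completeness remains scalar and is capped by construction.
--     "scope": 2,
--     "method": 3,
--     "style": 3,
-- }
--
-- _AXIS_INCOMPATIBILITIES: dict[str, dict[str, set[str]]] = {
--     "scope": {},
--     "method": {},
--     "style": {
--         # Jira-style issue containers and long-form ADR records are treated
--         # as mutually exclusive primary output containers.
--         "jira": {"adr"},
--         "adr": {"jira"},
--         # Synchronous session plans are a distinct container; currently no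
--         # explicit conflicts with other containers.
--         "sync": set(),
--     },
-- }
--
-- def _canonicalise_axis_tokens(axis: str, tokens: list[str]) -> list[str]:
--     """Normalise a sequence of axis tokens into a canonical set.
--
--     Behaviour:
--     - Trims blanks.
--     - Applies last-wins semantics with respect to per-axis incompatibilities:
--       when a new token arrives, any incompatible existing tokens are dropped.
--     - Deduplicates tokens.
--     - Applies per-axis soft caps (keeping the most recent tokens when over).
--     - Returns tokens sorted by a stable key (currently the short token string)
--       so equivalent sets have identical serialised forms.
--     """
--     raw = [t.strip() for t in tokens if t and t.strip()]
--     if not raw: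
--         return []
--
--     incompat_for_axis = _AXIS_INCOMPATIBILITIES.get(axis, {})
--     seen: set[str] = set()
--     ordered: list[str] = []
--
--     for token in raw:
--         conflicts = incompat_for_axis.get(token, set())
--         if conflicts:
--             # Drop any conflicting tokens that were accepted earlier.
--             ordered = [t for t in ordered if t not in conflicts]
--             seen -= conflicts
--         if token in seen:
--             continue
--         ordered.append(token)
--         seen.add(token)
--
--     cap = _AXIS_SOFT_CAPS.get(axis)
--     if cap is not None and cap > 0 and len(ordered) > cap:
--         # Enforce soft cap with last-wins semantics: keep the most recent.
--         ordered = ordered[-cap:]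
--
--     # Canonicalise order so equivalent sets serialise identically.
--     return sorted(ordered)
-- ===== SOURCE B (Python) =====
-- _AXIS_SOFT_CAPS: dict[str, int] = {
--     "scope": 2,
--     "method": 3,
--     "style": 3,
-- }
--
-- _AXIS_INCOMPATIBILITIES: dict[str, dict[str, set[str]]] = {
--     "scope": {},
--     "method": {},
--     "style": {
--         "jira": {"adr"},
--         "adr": {"jira"},
--         "sync": set(),
--     },
-- }
--
--
-- def _first_alive(incompat, raw, t):
--     """First index of t that is never invalidated by a later conflicting token.
--
--     Scans raw once: a conflicting occurrence resets the candidate; the first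
--     occurrence of t after the last reset is where t (finally) enters the
--     canonical order.  None means t does not survive.
--     """
--     first_alive = None
--     for i, u in enumerate(raw):
--         if t in incompat.get(u, set()):
--             first_alive = None
--         elif u == t and first_alive is None:
--             first_alive = i
--     return first_alive
--
--
-- def _canonicalise_axis_tokens(axis: str, tokens: list[str]) -> list[str]:
--     raw = [t.strip() for t in tokens if t and t.strip()]
--     if not raw:
--         return []
--
--     incompat = _AXIS_INCOMPATIBILITIES.get(axis, {})
--
--     # Per-token characterisation instead of a stateful forward simulation:
--     # each distinct token survives iff it has an occurrence after the last
--     # occurrence of any token conflicting with it; its canonical position is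
--     # the first such occurrence.
--     pairs = []
--     for t in set(raw):
--         fa = _first_alive(incompat, raw, t)
--         if fa is not None:
--             pairs.append((fa, t))
--     pairs.sort(key=lambda p: p[0])
--
--     cap = _AXIS_SOFT_CAPS.get(axis)
--     if cap is not None and cap > 0 and len(pairs) > cap:
--         pairs = pairs[-cap:]
--
--     return sorted(t for _, t in pairs)
-- ===== Notes on version B (the rewrite author's own statement) =====
-- stated objective: alternative
-- what changed: Replaces A's stateful forward simulation (mutable seen-set/ordered-list with an inner conflict rescan per token) by a per-token characterisation: each distinct token independently gets the index of its first occurrence after the last conflicting occurrence (one scan per distinct token), survivors are sorted by that index, capped, then sorted.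
import Mathlib
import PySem

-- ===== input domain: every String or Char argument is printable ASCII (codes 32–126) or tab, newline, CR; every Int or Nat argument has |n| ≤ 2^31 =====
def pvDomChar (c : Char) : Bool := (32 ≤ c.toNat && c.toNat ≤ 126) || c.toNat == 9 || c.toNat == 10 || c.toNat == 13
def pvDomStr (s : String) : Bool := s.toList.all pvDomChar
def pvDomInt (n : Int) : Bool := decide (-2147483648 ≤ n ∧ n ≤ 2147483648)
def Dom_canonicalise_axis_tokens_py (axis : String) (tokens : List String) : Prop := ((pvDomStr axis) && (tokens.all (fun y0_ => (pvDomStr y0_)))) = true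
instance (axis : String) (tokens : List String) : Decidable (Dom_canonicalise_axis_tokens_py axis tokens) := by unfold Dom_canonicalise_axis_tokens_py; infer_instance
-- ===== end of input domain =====

-- B replaces A's stateful forward simulation (mutable seen/ordered with conflict rescans) by a
-- per-token characterisation: each distinct token's surviving position is computed independently,
-- then positions are sorted; objective: alternative (same cost, different algorithm).

-- ===== PORT A =====
-- module constants, shared by both Pythons
def pvCaps : PySem.Dict String Int := PySem.Dict.mk [("scope", 2), ("method", 3), ("style", 3)]

def pvStyleIncompat : PySem.Dict String (PySem.Set String) :=
  PySem.Dict.mk [("jira", ["adr"]), ("adr", ["jira"]), ("sync", [])]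

def pvIncompat : PySem.Dict String (PySem.Dict String (PySem.Set String)) :=
  PySem.Dict.mk [("scope", PySem.Dict.mk []), ("method", PySem.Dict.mk []), ("style", pvStyleIncompat)]

-- raw = [t.strip() for t in tokens if t and t.strip()]  (identical first line of both Pythons)
def pvRaw (tokens : List String) : List String :=
  (tokens.filter (fun t => decide (t ≠ "") && decide (PySem.Str.strip t ≠ ""))).map (fun t => PySem.Str.strip t)

-- the body of A's `for token in raw:` loop over state (seen, ordered)
def pvStepA (incompat : PySem.Dict String (PySem.Set String))
    (st : PySem.Set String × List String) (token : String) : PySem.Set String × List String :=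
  let conflicts := incompat.getD token PySem.Set.empty
  let st := if conflicts ≠ [] then
      (PySem.Set.diff st.1 conflicts, st.2.filter (fun t => !(PySem.Set.contains conflicts t)))
    else st
  if PySem.Set.contains st.1 token then st
  else (PySem.Set.add st.1 token, st.2 ++ [token])

def canonicalise_axis_tokens_py (axis : String) (tokens : List String) : List String :=
  let raw := pvRaw tokens
  if raw = [] then []
  else
    let incompat := pvIncompat.getD axis PySem.Dict.empty
    let ordered := (raw.foldl (pvStepA incompat) (PySem.Set.empty, [])).2
    let ordered := match pvCaps.get? axis with
      | none => ordered
      | some c => if 0 < c ∧ c < (ordered.length : Int) then PySem.List.slice ordered (some (-c)) none else ordered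
    PySem.List.sorted ordered (fun t => t)

-- ===== PORT B =====
-- Source B's helper _first_alive: one scan of raw computing where t finally enters the canonical order
def pvFirstAlive (incompat : PySem.Dict String (PySem.Set String))
    (raw : List String) (t : String) : Option Int :=
  (PySem.List.enumerate raw).foldl (fun fa iu =>
    if PySem.Set.contains (incompat.getD iu.2 PySem.Set.empty) t then none
    else if iu.2 = t ∧ fa = none then some iu.1
    else fa) none

def canonicalise_axis_tokens_py_alt (axis : String) (tokens : List String) : List String :=
  let raw := pvRaw tokens
  if raw = [] then []
  else
    let incompat := pvIncompat.getD axis PySem.Dict.empty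
    let pairs := (PySem.Set.ofList raw).foldl (fun acc t =>
        match pvFirstAlive incompat raw t with
        | some i => acc ++ [(i, t)]
        | none => acc) ([] : List (Int × String))
    let pairs := PySem.List.sorted pairs (fun p => p.1)
    let pairs := match pvCaps.get? axis with
      | none => pairs
      | some c => if 0 < c ∧ c < (pairs.length : Int) then PySem.List.slice pairs (some (-c)) none else pairs
    PySem.List.sorted (pairs.map (fun p => p.2)) (fun t => t)

-- ===== PRECONDITION & SPEC =====
def Spec_canonicalise_axis_tokens_py (axis : String) (tokens : List String) (out : List String) : Prop := out = canonicalise_axis_tokens_py_alt axis tokens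
instance (axis : String) (tokens : List String) (out : List String) : Decidable (Spec_canonicalise_axis_tokens_py axis tokens out) := by unfold Spec_canonicalise_axis_tokens_py; infer_instance

-- ===== CLAIM (what is proved, stated in full; the proofs are below) =====
def Claim_equal_canonicalise_axis_tokens_py : Prop := ∀ (axis : String) (tokens : List String), Dom_canonicalise_axis_tokens_py axis tokens → Spec_canonicalise_axis_tokens_py axis tokens (canonicalise_axis_tokens_py axis tokens)

-- ===== LEMMAS AND PROOFS =====

def pvKey (incompat : PySem.Dict String (PySem.Set String)) (raw : List String) (t : String) : Int :=
  (pvFirstAlive incompat raw t).getD 0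

lemma pvFirstAlive_nil (incompat : PySem.Dict String (PySem.Set String)) (t : String) :
    pvFirstAlive incompat [] t = none := by
  simp [pvFirstAlive, PySem.List.enumerate]

lemma pvFirstAlive_append (incompat : PySem.Dict String (PySem.Set String))
    (raw : List String) (u t : String) :
    pvFirstAlive incompat (raw ++ [u]) t =
      if PySem.Set.contains (incompat.getD u PySem.Set.empty) t then none
      else if u = t ∧ pvFirstAlive incompat raw t = none then some (raw.length : Int)
      else pvFirstAlive incompat raw t := by
  unfold pvFirstAlive
  rw [PySem.List.enumerate_append, List.foldl_append]
  simp [PySem.List.enumerate]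

lemma pvStepA_eq (incompat : PySem.Dict String (PySem.Set String))
    (st : PySem.Set String × List String) (u : String) :
    pvStepA incompat st u =
      (let C := incompat.getD u PySem.Set.empty
       let s' := PySem.Set.diff st.1 C
       let o' := st.2.filter (fun t => !(PySem.Set.contains C t))
       if PySem.Set.contains s' u then (s', o')
       else (PySem.Set.add s' u, o' ++ [u])) := by
  unfold pvStepA
  by_cases hC : incompat.getD u PySem.Set.empty = ([] : List String)
  · rw [hC]
    have h1 : PySem.Set.diff st.1 ([] : List String) = st.1 := by
      simp [PySem.Set.diff]
    have h2 : st.2.filter (fun t => !(PySem.Set.contains ([] : List String) t)) = st.2 := by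
      simp [PySem.Set.contains]
    simp only [ne_eq, not_true_eq_false, if_false, h1, h2]
  · simp only [ne_eq, hC, not_false_eq_true, if_true]

lemma pv_inv (incompat : PySem.Dict String (PySem.Set String))
    (hirr : ∀ t, PySem.Set.contains (incompat.getD t PySem.Set.empty) t = false)
    (raw : List String) :
    (∀ x, x ∈ (raw.foldl (pvStepA incompat) (PySem.Set.empty, [])).1 ↔
          x ∈ (raw.foldl (pvStepA incompat) (PySem.Set.empty, [])).2) ∧
    (∀ t, t ∈ (raw.foldl (pvStepA incompat) (PySem.Set.empty, [])).2 ↔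
          (pvFirstAlive incompat raw t).isSome) ∧
    (raw.foldl (pvStepA incompat) (PySem.Set.empty, [])).2.Pairwise
      (fun a b => pvKey incompat raw a < pvKey incompat raw b) ∧
    (∀ t i, pvFirstAlive incompat raw t = some i →
          0 ≤ i ∧ i < (raw.length : Int) ∧ t ∈ raw) := by
  induction raw using List.reverseRecOn with
  | nil =>
    refine ⟨by simp, by simp [pvFirstAlive_nil], by simp, ?_⟩
    intro t i h
    rw [pvFirstAlive_nil] at h
    exact absurd h (by simp)
  | append_singleton raw u ih =>
    obtain ⟨ih1, ih2, ih3, ih4⟩ := ih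
    set S := raw.foldl (pvStepA incompat) (PySem.Set.empty, []) with hS
    set C := incompat.getD u PySem.Set.empty with hC
    have hCu : PySem.Set.contains C u = false := hirr u
    have hcf : ∀ (s : PySem.Set String) (x : String),
        PySem.Set.contains s x = false ↔ x ∉ s := by
      intro s x
      rw [Bool.eq_false_iff]
      exact not_congr (PySem.Set.contains_iff s x)
    set s' := PySem.Set.diff S.1 C with hs'
    set o' := S.2.filter (fun t => !(PySem.Set.contains C t)) with ho'
    have hstep : (raw ++ [u]).foldl (pvStepA incompat) (PySem.Set.empty, []) =
        (if PySem.Set.contains s' u then (s', o')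
         else (PySem.Set.add s' u, o' ++ [u])) := by
      rw [List.foldl_append, List.foldl_cons, List.foldl_nil, pvStepA_eq]
    have hmemo' : ∀ x, x ∈ o' ↔ (x ∈ S.2 ∧ PySem.Set.contains C x = false) := by
      intro x; simp [ho', List.mem_filter]
    have hmems' : ∀ x, x ∈ s' ↔ (x ∈ S.1 ∧ PySem.Set.contains C x = false) := by
      intro x
      rw [hs', PySem.Set.mem_diff, ← hcf]
    have hfa_conf : ∀ x, PySem.Set.contains C x = true →
        pvFirstAlive incompat (raw ++ [u]) x = none := by
      intro x hx; rw [pvFirstAlive_append, ← hC, if_pos hx]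
    have hfa_keep : ∀ x, PySem.Set.contains C x = false → (pvFirstAlive incompat raw x).isSome →
        pvFirstAlive incompat (raw ++ [u]) x = pvFirstAlive incompat raw x := by
      intro x hx hsome
      rw [pvFirstAlive_append, ← hC, if_neg (by rw [hx]; exact Bool.false_ne_true)]
      rw [if_neg]
      rintro ⟨-, hn⟩
      rw [hn] at hsome; simp at hsome
    have hfa_ne : ∀ x, PySem.Set.contains C x = false → x ≠ u →
        pvFirstAlive incompat (raw ++ [u]) x = pvFirstAlive incompat raw x := by
      intro x hx hne
      rw [pvFirstAlive_append, ← hC, if_neg (by rw [hx]; exact Bool.false_ne_true), if_neg]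
      rintro ⟨h, -⟩; exact hne h.symm
    have hfa_u : pvFirstAlive incompat (raw ++ [u]) u =
        (if pvFirstAlive incompat raw u = none then some (raw.length : Int)
         else pvFirstAlive incompat raw u) := by
      rw [pvFirstAlive_append, ← hC, if_neg (by rw [hCu]; exact Bool.false_ne_true)]
      by_cases h : pvFirstAlive incompat raw u = none
      · rw [if_pos ⟨rfl, h⟩, if_pos h]
      · rw [if_neg (by rintro ⟨-, hn⟩; exact h hn), if_neg h]
    have hlen : ((raw ++ [u]).length : Int) = (raw.length : Int) + 1 := by
      simp
    -- part (4) first, it is used by (3)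
    have part4 : ∀ t i, pvFirstAlive incompat (raw ++ [u]) t = some i →
        0 ≤ i ∧ i < ((raw ++ [u]).length : Int) ∧ t ∈ raw ++ [u] := by
      intro t i h
      rw [pvFirstAlive_append, ← hC] at h
      by_cases hct : PySem.Set.contains C t = true
      · rw [if_pos hct] at h; exact absurd h (by simp)
      · rw [if_neg hct] at h
        by_cases hcond : u = t ∧ pvFirstAlive incompat raw t = none
        · rw [if_pos hcond] at h
          injection h with h'
          refine ⟨by omega, by rw [hlen]; omega, ?_⟩
          rw [← hcond.1]; simp
        · rw [if_neg hcond] at h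
          obtain ⟨h1, h2, h3⟩ := ih4 t i h
          exact ⟨h1, by rw [hlen]; omega, by simp [h3]⟩
    -- keys of surviving elements are unchanged
    have hkey_keep : ∀ x, x ∈ o' → pvKey incompat (raw ++ [u]) x = pvKey incompat raw x := by
      intro x hx
      obtain ⟨hxS, hxc⟩ := (hmemo' x).mp hx
      have hsome : (pvFirstAlive incompat raw x).isSome := (ih2 x).mp hxS
      unfold pvKey
      rw [hfa_keep x hxc hsome]
    have hpair_o' : o'.Pairwise
        (fun a b => pvKey incompat (raw ++ [u]) a < pvKey incompat (raw ++ [u]) b) := by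
      have hsub : o'.Sublist S.2 := List.filter_sublist
      have := ih3.sublist hsub
      exact this.imp_of_mem (fun {a b} ha hb hab => by
        rw [hkey_keep a ha, hkey_keep b hb]; exact hab)
    rw [hstep]
    by_cases hm : PySem.Set.contains s' u = true
    · rw [if_pos hm]
      have humem : u ∈ o' := by
        have := (PySem.Set.contains_iff _ _).mp hm
        obtain ⟨h1, h2⟩ := (hmems' u).mp this
        exact (hmemo' u).mpr ⟨(ih1 u).mp h1, h2⟩
      refine ⟨?_, ?_, hpair_o', part4⟩
      · intro x
        rw [hmems' x, hmemo' x, ih1 x]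
      · intro t
        by_cases hct : PySem.Set.contains C t = true
        · rw [hfa_conf t hct]
          simp [hmemo' t, (PySem.Set.contains_iff C t).mp hct]
        · have hct := Bool.eq_false_iff.mpr hct
          by_cases htu : t = u
          · subst htu
            rw [hfa_u]
            refine ⟨fun _ => ?_, fun _ => humem⟩
            by_cases h : pvFirstAlive incompat raw t = none
            · rw [if_pos h]; rfl
            · rw [if_neg h]; exact Option.isSome_iff_ne_none.mpr h
          · rw [hfa_ne t hct htu]
            rw [hmemo' t, ih2 t]
            simp [(hcf C t).mp hct]
    · rw [if_neg hm]
      have hfanone : pvFirstAlive incompat raw u = none := by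
        by_contra h
        have hsome : (pvFirstAlive incompat raw u).isSome := Option.isSome_iff_ne_none.mpr h
        have huS2 : u ∈ S.2 := (ih2 u).mpr hsome
        have : u ∈ s' := (hmems' u).mpr ⟨(ih1 u).mpr huS2, hCu⟩
        exact hm ((PySem.Set.contains_iff _ _).mpr this)
      have hfau : pvFirstAlive incompat (raw ++ [u]) u = some (raw.length : Int) := by
        rw [hfa_u, if_pos hfanone]
      refine ⟨?_, ?_, ?_, part4⟩
      · intro x
        rw [PySem.Set.mem_add]
        simp only [List.mem_append, List.mem_singleton]
        rw [hmems' x, hmemo' x, ih1 x]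
      · intro t
        by_cases hct : PySem.Set.contains C t = true
        · rw [hfa_conf t hct]
          have htu : t ≠ u := by rintro rfl; rw [hCu] at hct; exact absurd hct (by simp)
          simp [hmemo' t, htu, (PySem.Set.contains_iff C t).mp hct]
        · have hct := Bool.eq_false_iff.mpr hct
          by_cases htu : t = u
          · subst htu
            rw [hfau]; simp
          · rw [hfa_ne t hct htu]
            simp only [List.mem_append, List.mem_singleton]
            rw [hmemo' t, ih2 t]
            simp [htu, (hcf C t).mp hct]
      · rw [List.pairwise_append]
        refine ⟨hpair_o', by simp, ?_⟩
        intro x hx y hy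
        rw [List.mem_singleton] at hy; subst hy
        rw [hkey_keep x hx]
        have hsome : (pvFirstAlive incompat raw x).isSome :=
          (ih2 x).mp ((hmemo' x).mp hx).1
        obtain ⟨i, hi⟩ := Option.isSome_iff_exists.mp hsome
        have := ih4 x i hi
        unfold pvKey
        rw [hi, hfau]
        simpa using this.2.1

-- the fixed incompatibility table never makes a token conflict with itself
lemma pv_hirr (axis : String) :
    ∀ t, PySem.Set.contains ((pvIncompat.getD axis PySem.Dict.empty).getD t PySem.Set.empty) t = false := by
  intro t
  simp only [pvIncompat, pvStyleIncompat, PySem.Dict.getD, PySem.Dict.get?, List.find?]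
  repeat' split
  all_goals simp_all [PySem.Dict.empty]
  by_cases h1 : t = "jira"
  · subst h1; decide
  by_cases h2 : t = "adr"
  · subst h2; decide
  by_cases h3 : t = "sync"
  · subst h3; decide
  have hf : List.find? (fun p => p.1 == t)
      ([("jira", (["adr"] : List String)), ("adr", ["jira"]), ("sync", [])]) = none := by
    simp [List.find?_eq_none]
    exact ⟨fun h => h1 h.symm, fun h => h2 h.symm, fun h => h3 h.symm⟩
  simp [hf]

-- B's pair-building fold is a filterMap over the distinct tokens
lemma pv_pairs_filterMap (incompat : PySem.Dict String (PySem.Set String))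
    (raw : List String) (l : List String) (acc : List (Int × String)) :
    l.foldl (fun acc t =>
        match pvFirstAlive incompat raw t with
        | some i => acc ++ [(i, t)]
        | none => acc) acc =
      acc ++ l.filterMap (fun t => (pvFirstAlive incompat raw t).map (fun i => (i, t))) := by
  induction l generalizing acc with
  | nil => simp
  | cons x xs ih =>
    cases h : pvFirstAlive incompat raw x <;> simp [h, ih]

-- ===== VERDICT (by name: the statement is the Claim_ definition above) =====
theorem canonicalise_axis_tokens_py_spec : Claim_equal_canonicalise_axis_tokens_py := by
  intro axis tokens _
  unfold Spec_canonicalise_axis_tokens_py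
  unfold canonicalise_axis_tokens_py canonicalise_axis_tokens_py_alt
  by_cases hraw : pvRaw tokens = []
  · simp [hraw]
  · simp only [hraw, if_false]
    set raw := pvRaw tokens with hraws
    set incompat := pvIncompat.getD axis PySem.Dict.empty with hinc
    obtain ⟨ih1, ih2, ih3, ih4⟩ := pv_inv incompat (pv_hirr axis) raw
    set o := (raw.foldl (pvStepA incompat) (PySem.Set.empty, [])).2 with ho
    set ys := o.map (fun t => (pvKey incompat raw t, t)) with hys
    have nodup_o : o.Nodup := by
      exact ih3.imp (fun {a b} hab => fun heq => absurd (heq ▸ hab) (lt_irrefl _))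
    have hys_mem : ∀ p : Int × String, p ∈ ys ↔ pvFirstAlive incompat raw p.2 = some p.1 := by
      intro p
      rw [hys, List.mem_map]
      constructor
      · rintro ⟨t, ht, rfl⟩
        obtain ⟨i, hi⟩ := Option.isSome_iff_exists.mp ((ih2 t).mp ht)
        simp [pvKey, hi]
      · intro h
        refine ⟨p.2, (ih2 p.2).mpr (by simp [h]), ?_⟩
        simp [pvKey, h]
    have hpb : (PySem.Set.ofList raw).foldl (fun acc t =>
        match pvFirstAlive incompat raw t with
        | some i => acc ++ [(i, t)]
        | none => acc) ([] : List (Int × String)) =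
        (PySem.Set.ofList raw).filterMap
          (fun t => (pvFirstAlive incompat raw t).map (fun i => (i, t))) := by
      rw [pv_pairs_filterMap]; rfl
    have hpb_mem : ∀ p : Int × String,
        p ∈ (PySem.Set.ofList raw).filterMap
          (fun t => (pvFirstAlive incompat raw t).map (fun i => (i, t))) ↔
        pvFirstAlive incompat raw p.2 = some p.1 := by
      intro p
      rw [List.mem_filterMap]
      constructor
      · rintro ⟨t, -, ht⟩
        cases h : pvFirstAlive incompat raw t with
        | none => rw [h] at ht; simp at ht
        | some i =>
          rw [h] at ht
          simp only [Option.map_some, Option.some.injEq] at ht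
          rw [← ht]
          simpa using h
      · intro h
        refine ⟨p.2, ?_, by simp [h]⟩
        rw [PySem.Set.mem_ofList]
        exact (ih4 p.2 p.1 h).2.2
    have nodup_pb : ((PySem.Set.ofList raw).filterMap
        (fun t => (pvFirstAlive incompat raw t).map (fun i => (i, t)))).Nodup := by
      refine (PySem.Set.nodup_ofList raw).filterMap ?_
      intro a a' b hb hb'
      cases h : pvFirstAlive incompat raw a <;> rw [h] at hb <;>
        simp only [Option.mem_def, Option.map_none, Option.map_some, Option.some.injEq, reduceCtorEq] at hb
      cases h' : pvFirstAlive incompat raw a' <;> rw [h'] at hb' <;>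
        simp only [Option.mem_def, Option.map_none, Option.map_some, Option.some.injEq, reduceCtorEq] at hb'
      rw [← hb] at hb'
      exact (congrArg Prod.snd hb').symm
    have nodup_ys : ys.Nodup := by
      refine nodup_o.map ?_
      intro a b hab
      exact congrArg Prod.snd hab
    have hperm : ys.Perm ((PySem.Set.ofList raw).filterMap
        (fun t => (pvFirstAlive incompat raw t).map (fun i => (i, t)))) := by
      rw [List.perm_ext_iff_of_nodup nodup_ys nodup_pb]
      intro p
      rw [hys_mem p, hpb_mem p]
    have hpair_ys : ys.Pairwise (fun a b => a.1 < b.1) := by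
      rw [hys, List.pairwise_map]
      exact ih3
    have hsorted : PySem.List.sorted ((PySem.Set.ofList raw).filterMap
        (fun t => (pvFirstAlive incompat raw t).map (fun i => (i, t))))
        (fun p => p.1) = ys :=
      PySem.List.sorted_eq_of_perm_of_pairwise_lt _ ys (fun p => p.1) hperm hpair_ys
    have hsnd : ys.map (fun p => p.2) = o := by
      rw [hys, List.map_map]
      simp [Function.comp_def]
    have hlen : ys.length = o.length := by rw [hys, List.length_map]
    rw [hpb, hsorted]
    cases hcap : pvCaps.get? axis with
    | none =>
      dsimp only
      rw [hsnd]
    | some c =>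
      dsimp only
      rw [hlen]
      by_cases hcond : 0 < c ∧ c < (o.length : Int)
      · rw [if_pos hcond, if_pos hcond]
        rw [PySem.List.slice_some_none, PySem.List.slice_some_none, hlen]
        rw [← List.map_drop, List.map_map]
        simp [Function.comp_def]
      · rw [if_neg hcond, if_neg hcond, hsnd]
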